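-- pv_equiv track=rewrite | github.com/Hermann-SW/RSA_numbers_factored | python/RSA_numbers_factored.py | square_sums_
-- ===== SOURCE A (Python) =====
-- from typing import Tuple, List, Union, Dict, NewType, Type
--
-- IntList2 = NewType("IntList2", List[Tuple[int, int]])
--
-- def square_sums_(s: List[int]) -> Type[IntList2]:
--     """
--     Args:
--         s: List of int returned by square_sum_prod(n).
--     Returns:
--         _: List of int pairs, their squares summing up to n.
--     Example:
--         For composite number RSA-59.
--     ```
--         >>> r = rsa[0]
--         >>> s = square_sum_prod(r)
--         >>> square_sums_(s)
--         [[93861205413769670113229603198, 250662312444502854557140314865], \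
-- [264836754409721537369435955610, 38768728061109707828243001823]]
--         >>> for a,b in square_sums_(s):
--         ...     a**2 + b**2 == r[1]
--         ...
--         True
--         True
--         >>>
--     ```
--     """
--     if len(s) == 2:
--         return [s]
--
--     b = s.pop()
--     a = s.pop()
--     r = []
--     for p in square_sums_(s):
--         # Brahmagupta–Fibonacci identity
--         r.append([abs(a * p[0] - b * p[1]), a * p[1] + b * p[0]])
--         r.append([a * p[0] + b * p[1], abs(b * p[0] - a * p[1])])
--     s.append(a)
--     s.append(b)
--     return r
-- ===== SOURCE B (Python) =====
-- def square_sums_(s):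
--     # Iterative fold over consecutive pairs of s (no recursion, no mutation of s).
--     res = [[s[0], s[1]]]
--     it = iter(s[2:])
--     for a, b in zip(it, it):
--         # Brahmagupta-Fibonacci identity, applied to every pair accumulated so far
--         res = [q for p in res
--                  for q in ([abs(a * p[0] - b * p[1]), a * p[1] + b * p[0]],
--                            [a * p[0] + b * p[1], abs(b * p[0] - a * p[1])])]
--     return res
-- ===== Notes on version B (the rewrite author's own statement) =====
-- stated objective: idiomatic
-- what changed: Replaces the pop/re-append recursion with a left-to-right iterative fold over the consecutive pairs of s (zip over an iterator of s[2:]), building each new level with a flat comprehension and never mutating s.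
import Mathlib
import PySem

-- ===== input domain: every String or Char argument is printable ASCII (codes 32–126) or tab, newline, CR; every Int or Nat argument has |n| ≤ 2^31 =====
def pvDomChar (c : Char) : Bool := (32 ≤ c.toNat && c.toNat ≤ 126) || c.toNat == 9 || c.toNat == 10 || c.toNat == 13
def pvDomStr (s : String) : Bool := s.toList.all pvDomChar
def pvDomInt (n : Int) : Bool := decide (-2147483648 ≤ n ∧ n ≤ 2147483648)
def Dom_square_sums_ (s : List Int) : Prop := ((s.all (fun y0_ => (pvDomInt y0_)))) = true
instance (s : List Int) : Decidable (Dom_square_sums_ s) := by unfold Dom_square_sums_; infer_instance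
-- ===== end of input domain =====

-- B replaces A's pop/re-append recursion by an iterative fold over the consecutive
-- pairs of s (idiomatic, no mutation of s); return values proved equal on even-length
-- lists with at least two elements (elsewhere A raises IndexError).


-- ===== PORT A =====
-- literal port of A: base case len==2 returns [s]; otherwise pop b, pop a,
-- recurse, and append the two Brahmagupta–Fibonacci combinations for each pair.
-- (A re-appends a and b to s afterwards; s is restored, so the return value is unaffected.)
def square_sums_ (s : List Int) : List (List Int) :=
  if s.length = 2 then [s]
  else
    match hpop1 : PySem.List.pop? s with
    | none => []                                -- Python: IndexError (pop from empty list)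
    | some (b, s1) =>
      match hpop2 : PySem.List.pop? s1 with
      | none => []                              -- Python: IndexError
      | some (a, s2) =>
        (square_sums_ s2).foldl (fun r p =>
          let p0 := (PySem.List.pyGet? p 0).getD 0   -- p[0]; always in range here
          let p1 := (PySem.List.pyGet? p 1).getD 0   -- p[1]; always in range here
          r ++ [[|a * p0 - b * p1|, a * p1 + b * p0],
                [a * p0 + b * p1, |b * p0 - a * p1|]]) []
termination_by s.length
decreasing_by
  have h1 := PySem.List.length_of_pop?_eq_some s hpop1
  have h2 := PySem.List.length_of_pop?_eq_some s1 hpop2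
  simp at h1 h2; omega

-- ===== PORT B =====
-- zip(it, it) over it = iter(s[2:]): the list of consecutive pairs of s.drop 2
def pvPairs : List Int → List (Int × Int)
  | a :: b :: t => (a, b) :: pvPairs t
  | _ => []

def square_sums__alt (s : List Int) : List (List Int) :=
  (pvPairs (PySem.List.slice s (some 2) none)).foldl
    (fun res ab =>
      res.flatMap (fun p =>
        let p0 := (PySem.List.pyGet? p 0).getD 0   -- p[0]; always in range here
        let p1 := (PySem.List.pyGet? p 1).getD 0   -- p[1]; always in range here
        [[|ab.1 * p0 - ab.2 * p1|, ab.1 * p1 + ab.2 * p0],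
         [ab.1 * p0 + ab.2 * p1, |ab.2 * p0 - ab.1 * p1|]]))
    [[(PySem.List.pyGet? s 0).getD 0, (PySem.List.pyGet? s 1).getD 0]]

-- ===== PRECONDITION & SPEC =====
-- A raises IndexError (pop from an empty list / recursion reaching length < 2)
-- exactly on lists of odd length or of length < 2; Pre_ excludes only those.
def Pre_square_sums_ (s : List Int) : Prop := s.length % 2 = 0 ∧ 2 ≤ s.length
instance (s : List Int) : Decidable (Pre_square_sums_ s) := by unfold Pre_square_sums_; infer_instance
def pvWitness_square_sums_ : List Int := [3, 4, 5, 12]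

def Spec_square_sums_ (s : List Int) (out : List (List Int)) : Prop := out = square_sums__alt s
instance (s : List Int) (out : List (List Int)) : Decidable (Spec_square_sums_ s out) := by unfold Spec_square_sums_; infer_instance

-- ===== CLAIM (what is proved, stated in full; the proofs are below) =====
def Claim_equal_square_sums_ : Prop := ∀ (s : List Int), Dom_square_sums_ s → Pre_square_sums_ s → Spec_square_sums_ s (square_sums_ s)

-- ===== LEMMAS AND PROOFS =====

theorem pvPairs_append_pair (a b : Int) :
    ∀ (u : List Int), u.length % 2 = 0 → pvPairs (u ++ [a, b]) = pvPairs u ++ [(a, b)]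
  | [], _ => by simp [pvPairs]
  | [x], h => by simp at h
  | x :: y :: t, h => by
    simp only [List.cons_append, pvPairs, List.nil_append]
    rw [pvPairs_append_pair a b t (by simp at h; omega)]

theorem alt_append_pair (t : List Int) (a b : Int) (h : 2 ≤ t.length)
    (he : t.length % 2 = 0) :
    square_sums__alt (t ++ [a, b]) =
      (square_sums__alt t).flatMap (fun p =>
        let p0 := (PySem.List.pyGet? p 0).getD 0
        let p1 := (PySem.List.pyGet? p 1).getD 0
        [[|a * p0 - b * p1|, a * p1 + b * p0],
         [a * p0 + b * p1, |b * p0 - a * p1|]]) := by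
  unfold square_sums__alt
  have hs : PySem.List.slice (t ++ [a, b]) (some 2) none = t.drop 2 ++ [a, b] := by
    have := PySem.List.slice_from_natCast (t ++ [a, b]) 2
    simpa [List.drop_append_of_le_length h] using this
  have hs' : PySem.List.slice t (some 2) none = t.drop 2 :=
    PySem.List.slice_from_natCast t 2
  rw [hs, hs', pvPairs_append_pair _ _ _ (by simp; omega), List.foldl_append]
  have h0 : PySem.List.pyGet? (t ++ [a, b]) 0 = PySem.List.pyGet? t 0 := by
    match t, h with
    | x :: y :: t', _ => simp [PySem.List.pyGet?_zero]
  have h1 : PySem.List.pyGet? (t ++ [a, b]) 1 = PySem.List.pyGet? t 1 := by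
    match t, h with
    | x :: y :: t', _ =>
      have hnn : (0:Int) ≤ (t'.length:Int) + 2 := by positivity
      simp [PySem.List.pyGet?, PySem.List.pyIdx?, hnn]
  rw [h0, h1]
  simp

theorem main_lemma : ∀ n (s : List Int), s.length = n → n % 2 = 0 → 2 ≤ n →
    square_sums_ s = square_sums__alt s := by
  intro n
  induction n using Nat.strong_induction_on with
  | _ n ih =>
    intro s hlen hmod h2
    by_cases hb : s.length = 2
    · match s, hb with
      | [x, y], _ =>
        rw [square_sums_]
        simp [square_sums__alt, pvPairs, PySem.List.slice, PySem.List.clampIdx,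
          PySem.List.pyGet?, PySem.List.pyIdx?]
    · obtain ⟨t, a, b, rfl⟩ : ∃ t a b, s = t ++ [a, b] := by
        rcases hr : s.reverse with _ | ⟨b', rest⟩
        · exfalso; have : s = [] := by simpa using congrArg List.reverse hr
          subst this; simp at hlen; omega
        · rcases rest with _ | ⟨a', t'⟩
          · exfalso
            have : s = [b'] := by
              have := congrArg List.reverse hr; simpa using this
            subst this; simp at hlen; omega
          · refine ⟨t'.reverse, a', b', ?_⟩
            have := congrArg List.reverse hr
            simpa using this
      have hlt : t.length + 2 = n := by simpa using hlen
      have hn2 : n ≠ 2 := fun hx => hb (by rw [hlen, hx])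
      have htm : t.length % 2 = 0 := by omega
      have ht2 : 2 ≤ t.length := by omega
      have hp1 : PySem.List.pop? (t ++ [a, b]) = some (b, t ++ [a]) := by
        have := PySem.List.pop?_last (t ++ [a]) b
        simpa using this
      have hp2 : PySem.List.pop? (t ++ [a]) = some (a, t) :=
        PySem.List.pop?_last t a
      rw [square_sums_, if_neg hb]
      split
      next heq => simp [hp1] at heq
      next b' s1 heq =>
        rw [hp1] at heq
        simp only [Option.some.injEq, Prod.mk.injEq] at heq
        obtain ⟨rfl, rfl⟩ := heq
        split
        next heq2 => simp [hp2] at heq2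
        next a' s2 heq2 =>
          rw [hp2] at heq2
          simp only [Option.some.injEq, Prod.mk.injEq] at heq2
          obtain ⟨rfl, rfl⟩ := heq2
          rw [ih t.length (by omega) t rfl htm ht2]
          rw [alt_append_pair t a b ht2 htm]
          simp [PySem.List.foldl_append_eq_flatMap, List.flatMap_def]

-- ===== VERDICT (by name: the statement is the Claim_ definition above) =====
theorem square_sums__spec : Claim_equal_square_sums_ := by
  intro s _ hpre
  unfold Spec_square_sums_
  exact main_lemma s.length s rfl hpre.1 hpre.2
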